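-- pv_equiv track=rewrite | github.com/anujuniyal/college_virtual_assistant | app/services/weekly_report_analytics.py | _categorize_queries
-- ===== SOURCE A (Python) =====
-- from typing import Dict, List, Any
--
-- def _categorize_queries(queries: List[str]) -> Dict[str, int]:
--     """Simple categorization of queries based on keywords"""
--     categories = {
--         'fees': 0,
--         'results': 0,
--         'admission': 0,
--         'courses': 0,
--         'faculty': 0,
--         'general': 0
--     }
--
--     category_keywords = {
--         'fees': ['fee', 'payment', 'cost', 'fees', 'paid', 'due'],
--         'results': ['result', 'mark', 'grade', 'score', 'exam'],
--         'admission': ['admission', 'apply', 'join', 'enroll'],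
--         'courses': ['course', 'subject', 'syllabus', 'curriculum'],
--         'faculty': ['teacher', 'professor', 'faculty', 'staff']
--     }
--
--     for query in queries:
--         query_lower = query.lower()
--         categorized = False
--
--         for category, keywords in category_keywords.items():
--             if any(keyword in query_lower for keyword in keywords):
--                 categories[category] += 1
--                 categorized = True
--                 break
--
--         if not categorized:
--             categories['general'] += 1
--
--     return categories
-- ===== SOURCE B (Python) =====
-- from typing import Dict, List
--
-- _PRIORITY = [
--     ('fees', ['fee', 'payment', 'cost', 'fees', 'paid', 'due']),
--     ('results', ['result', 'mark', 'grade', 'score', 'exam']),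
--     ('admission', ['admission', 'apply', 'join', 'enroll']),
--     ('courses', ['course', 'subject', 'syllabus', 'curriculum']),
--     ('faculty', ['teacher', 'professor', 'faculty', 'staff']),
-- ]
--
--
-- def _categorize_queries(queries: List[str]) -> Dict[str, int]:
--     """Sieve: successively partition the query list by each category in
--     priority order; whatever survives every sieve is 'general'."""
--     remaining = [q.lower() for q in queries]
--     counts = {}
--     for cat, kws in _PRIORITY:
--         matched = [q for q in remaining if any(k in q for k in kws)]
--         remaining = [q for q in remaining if not any(k in q for k in kws)]
--         counts[cat] = len(matched)
--     counts['general'] = len(remaining)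
--     return counts
-- ===== Notes on version B (the rewrite author's own statement) =====
-- stated objective: alternative
-- what changed: Inverts the loop nesting: instead of classifying each query with a per-query first-match scan and incrementing a counter dict, B runs a sieve over the category list, at each category partitioning the surviving query list into matched (counted) and unmatched (passed on), with the final survivors counted as 'general'.
import Mathlib
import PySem

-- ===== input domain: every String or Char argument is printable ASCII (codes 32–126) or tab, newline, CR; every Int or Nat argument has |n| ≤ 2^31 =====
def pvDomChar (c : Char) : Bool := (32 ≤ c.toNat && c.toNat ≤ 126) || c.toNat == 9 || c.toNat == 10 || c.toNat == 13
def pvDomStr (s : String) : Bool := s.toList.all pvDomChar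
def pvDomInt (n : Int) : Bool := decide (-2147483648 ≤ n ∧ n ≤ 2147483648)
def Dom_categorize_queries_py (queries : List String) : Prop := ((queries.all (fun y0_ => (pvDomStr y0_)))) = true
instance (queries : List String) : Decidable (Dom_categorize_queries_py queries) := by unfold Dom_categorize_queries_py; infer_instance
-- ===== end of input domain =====

-- B replaces A's per-query first-match loop (mutable counter dict + categorized flag + break)
-- by a category-major sieve: for each category in priority order it partitions the surviving
-- lowercased query list into matched (counted) and unmatched (passed on); the final survivors
-- are 'general'. Objective: alternative (same cost, inverted loop nesting).

-- ===== PORT A =====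
def aCategoryKeywords : List (String × List String) :=
  [("fees", ["fee", "payment", "cost", "fees", "paid", "due"]),
   ("results", ["result", "mark", "grade", "score", "exam"]),
   ("admission", ["admission", "apply", "join", "enroll"]),
   ("courses", ["course", "subject", "syllabus", "curriculum"]),
   ("faculty", ["teacher", "professor", "faculty", "staff"])]

-- the inner 'for category, keywords in …: if any(…): categories[category] += 1; break'
-- ('categories[category] += 1' is Dict.modify; the key is always present, so the default 0 is never read)
def aInner (ql : String) : List (String × List String) → PySem.Dict String Int →
    PySem.Dict String Int × Bool
  | [], cats => (cats, false)
  | (category, keywords) :: rest, cats =>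
      if keywords.any (fun keyword => PySem.Str.isIn keyword ql) then
        (cats.modify category 0 (· + 1), true)
      else aInner ql rest cats

def categorize_queries_py (queries : List String) : List (String × Int) :=
  let categories : PySem.Dict String Int :=
    PySem.Dict.ofList [("fees", 0), ("results", 0), ("admission", 0),
                       ("courses", 0), ("faculty", 0), ("general", 0)]
  let final := queries.foldl (fun cats query =>
    let query_lower := PySem.Str.lower query
    let res := aInner query_lower aCategoryKeywords cats
    if res.2 then res.1 else res.1.modify "general" 0 (· + 1)) categories
  final.items

-- ===== PORT B =====
def bPriority : List (String × List String) :=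
  [("fees", ["fee", "payment", "cost", "fees", "paid", "due"]),
   ("results", ["result", "mark", "grade", "score", "exam"]),
   ("admission", ["admission", "apply", "join", "enroll"]),
   ("courses", ["course", "subject", "syllabus", "curriculum"]),
   ("faculty", ["teacher", "professor", "faculty", "staff"])]

-- 'any(k in q for k in kws)'
def bMatches (kws : List String) (q : String) : Bool :=
  kws.any (fun k => PySem.Str.isIn k q)

def categorize_queries_py_alt (queries : List String) : List (String × Int) :=
  -- remaining = [q.lower() for q in queries]; counts = {}
  -- for cat, kws in _PRIORITY: matched/remaining partition; counts[cat] = len(matched)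
  let st := bPriority.foldl
    (fun (st : PySem.Dict String Int × List String) p =>
      let matched := st.2.filter (fun q => bMatches p.2 q)
      let remaining := st.2.filter (fun q => !bMatches p.2 q)
      (st.1.insert p.1 (matched.length : Int), remaining))
    (PySem.Dict.empty, queries.map PySem.Str.lower)
  -- counts['general'] = len(remaining)
  (st.1.insert "general" (st.2.length : Int)).items

-- ===== PRECONDITION & SPEC =====
def Spec_categorize_queries_py (queries : List String) (out : List (String × Int)) : Prop := out = categorize_queries_py_alt queries
instance (queries : List String) (out : List (String × Int)) : Decidable (Spec_categorize_queries_py queries out) := by unfold Spec_categorize_queries_py; infer_instance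

-- ===== CLAIM (what is proved, stated in full; the proofs are below) =====
def Claim_equal_categorize_queries_py : Prop := ∀ (queries : List String), Dom_categorize_queries_py queries → Spec_categorize_queries_py queries (categorize_queries_py queries)

-- ===== LEMMAS AND PROOFS =====

-- proof-side helpers: the first-match label of one query, and the six category names
def firstCat (q : String) : String :=
  let ql := PySem.Str.lower q
  if bMatches ["fee", "payment", "cost", "fees", "paid", "due"] ql then "fees"
  else if bMatches ["result", "mark", "grade", "score", "exam"] ql then "results"
  else if bMatches ["admission", "apply", "join", "enroll"] ql then "admission"
  else if bMatches ["course", "subject", "syllabus", "curriculum"] ql then "courses"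
  else if bMatches ["teacher", "professor", "faculty", "staff"] ql then "faculty"
  else "general"

def catNames : List String :=
  ["fees", "results", "admission", "courses", "faculty", "general"]

def mkSix (v1 v2 v3 v4 v5 v6 : Int) : PySem.Dict String Int :=
  PySem.Dict.mk [("fees", v1), ("results", v2), ("admission", v3),
                 ("courses", v4), ("faculty", v5), ("general", v6)]

-- A's per-query step (inner loop with break, else 'general') increments exactly the firstCat label
lemma step_eq_modify (q : String) (d : PySem.Dict String Int) :
    (let query_lower := PySem.Str.lower q
     let res := aInner query_lower aCategoryKeywords d
     if res.2 then res.1 else res.1.modify "general" 0 (· + 1))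
      = d.modify (firstCat q) 0 (· + 1) := by
  simp only [aCategoryKeywords, aInner, firstCat, bMatches]
  split_ifs <;> simp_all

lemma firstCat_mem (q : String) : firstCat q ∈ catNames := by
  simp only [firstCat]
  split_ifs <;> decide

lemma fold_modify_items (f : String → String) (qs : List String)
    (h : ∀ q, f q ∈ catNames) (v1 v2 v3 v4 v5 v6 : Int) :
    (qs.foldl (fun d q => d.modify (f q) 0 (· + 1)) (mkSix v1 v2 v3 v4 v5 v6)).items
      = [("fees", v1 + ((qs.map f).count "fees" : Int)),
         ("results", v2 + ((qs.map f).count "results" : Int)),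
         ("admission", v3 + ((qs.map f).count "admission" : Int)),
         ("courses", v4 + ((qs.map f).count "courses" : Int)),
         ("faculty", v5 + ((qs.map f).count "faculty" : Int)),
         ("general", v6 + ((qs.map f).count "general" : Int))] := by
  induction qs generalizing v1 v2 v3 v4 v5 v6 with
  | nil => simp [mkSix]
  | cons q rest ih =>
      have hx : f q ∈ catNames := h q
      simp only [catNames, List.mem_cons, List.not_mem_nil, or_false] at hx
      rw [List.foldl_cons, List.map_cons]
      rcases hx with hx | hx | hx | hx | hx | hx <;> rw [hx] <;>
        [ rw [show (mkSix v1 v2 v3 v4 v5 v6).modify "fees" 0 (· + 1)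
              = mkSix (v1 + 1) v2 v3 v4 v5 v6 from by
              simp [mkSix, PySem.Dict.modify, PySem.Dict.insert, PySem.Dict.contains,
                    PySem.Dict.get?, PySem.Dict.getD]];
          rw [show (mkSix v1 v2 v3 v4 v5 v6).modify "results" 0 (· + 1)
              = mkSix v1 (v2 + 1) v3 v4 v5 v6 from by
              simp [mkSix, PySem.Dict.modify, PySem.Dict.insert, PySem.Dict.contains,
                    PySem.Dict.get?, PySem.Dict.getD]];
          rw [show (mkSix v1 v2 v3 v4 v5 v6).modify "admission" 0 (· + 1)
              = mkSix v1 v2 (v3 + 1) v4 v5 v6 from by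
              simp [mkSix, PySem.Dict.modify, PySem.Dict.insert, PySem.Dict.contains,
                    PySem.Dict.get?, PySem.Dict.getD]];
          rw [show (mkSix v1 v2 v3 v4 v5 v6).modify "courses" 0 (· + 1)
              = mkSix v1 v2 v3 (v4 + 1) v5 v6 from by
              simp [mkSix, PySem.Dict.modify, PySem.Dict.insert, PySem.Dict.contains,
                    PySem.Dict.get?, PySem.Dict.getD]];
          rw [show (mkSix v1 v2 v3 v4 v5 v6).modify "faculty" 0 (· + 1)
              = mkSix v1 v2 v3 v4 (v5 + 1) v6 from by
              simp [mkSix, PySem.Dict.modify, PySem.Dict.insert, PySem.Dict.contains,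
                    PySem.Dict.get?, PySem.Dict.getD]];
          rw [show (mkSix v1 v2 v3 v4 v5 v6).modify "general" 0 (· + 1)
              = mkSix v1 v2 v3 v4 v5 (v6 + 1) from by
              simp [mkSix, PySem.Dict.modify, PySem.Dict.insert, PySem.Dict.contains,
                    PySem.Dict.get?, PySem.Dict.getD]]] <;>
        rw [ih] <;> simp <;> ring

-- ===== VERDICT (by name: the statement is the Claim_ definition above) =====
theorem categorize_queries_py_spec : Claim_equal_categorize_queries_py := by
  intro queries _
  unfold Spec_categorize_queries_py categorize_queries_py categorize_queries_py_alt
  -- A side: fold of per-query increments of the firstCat label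
  have hstep : (fun (cats : PySem.Dict String Int) (query : String) =>
      let query_lower := PySem.Str.lower query
      let res := aInner query_lower aCategoryKeywords cats
      if res.2 then res.1 else res.1.modify "general" 0 (· + 1))
      = fun cats q => cats.modify (firstCat q) 0 (· + 1) :=
    funext fun cats => funext fun q => step_eq_modify q cats
  rw [hstep]
  rw [show (PySem.Dict.ofList [("fees", (0:Int)), ("results", 0), ("admission", 0),
        ("courses", 0), ("faculty", 0), ("general", 0)]) = mkSix 0 0 0 0 0 0 from by decide]
  rw [fold_modify_items firstCat queries firstCat_mem]
  -- B side: unfold the 5-step sieve over the literal priority list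
  simp only [bPriority, List.foldl]
  simp only [PySem.Dict.empty, PySem.Dict.insert, PySem.Dict.contains,
             ← List.countP_eq_length_filter, List.countP_filter]
  simp
  refine ⟨?_, ?_, ?_, ?_, ?_, ?_⟩ <;>
    (rw [List.count_eq_countP, List.countP_map]
     refine List.countP_congr fun q _ => ?_
     simp only [Function.comp_apply, beq_iff_eq, firstCat]
     split_ifs <;> simp_all)
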